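-- pv_equiv track=rewrite | github.com/kaestro/algorithm-study | February/21st/kick_start.py | kick_start
-- ===== SOURCE A (Python) =====
-- def kick_start(s):
--     num_kicks = 0
--     result = 0
--     for i in range(len(s)):
--         if s.startswith("kick",i):
--             num_kicks += 1
--         if s.startswith("start",i):
--             result += num_kicks
--
--     return result
-- ===== SOURCE B (Python) =====
-- def kick_start(s):
--     # collect-then-count: build index tables of all (overlapping) match positions,
--     # then sum, for each "start" position, the number of "kick" positions before it
--     kick_pos = [i for i in range(len(s)) if s.startswith("kick", i)]
--     start_pos = [i for i in range(len(s)) if s.startswith("start", i)]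
--     return sum(sum(1 for k in kick_pos if k < p) for p in start_pos)
-- ===== Notes on version B (the rewrite author's own statement) =====
-- stated objective: alternative
-- what changed: Replaces the single pass with a running counter by a collect-then-count decomposition: two index tables of all overlapping match positions are built first, then each occurrence of the second pattern contributes the number of occurrences of the first pattern strictly before it.
import Mathlib
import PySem

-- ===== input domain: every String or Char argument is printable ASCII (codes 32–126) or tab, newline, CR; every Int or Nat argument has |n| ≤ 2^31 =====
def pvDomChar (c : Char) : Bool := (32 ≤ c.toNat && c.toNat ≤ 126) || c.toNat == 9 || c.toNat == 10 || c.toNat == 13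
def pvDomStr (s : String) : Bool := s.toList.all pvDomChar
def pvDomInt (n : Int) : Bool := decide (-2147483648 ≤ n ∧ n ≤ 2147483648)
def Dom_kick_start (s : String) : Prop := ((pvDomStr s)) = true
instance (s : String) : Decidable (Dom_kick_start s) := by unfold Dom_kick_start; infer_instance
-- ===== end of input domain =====

-- B rewrites A's single pass (running kick counter) as collect-then-count over two
-- position tables; same value on every input (objective: alternative decomposition).

-- shared helper: Python's s.startswith(pat, i) for 0 ≤ i (exact there: prefix test at offset i)
def startsAt (l : List Char) (pat : List Char) (i : Nat) : Bool :=
  PySem.Chars.startswith (l.drop i) pat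

-- ===== PORT A =====
def kick_start (s : String) : Int :=
  ((List.range s.toList.length).foldl
    (fun (acc : Int × Int) i =>
      let nk := if startsAt s.toList "kick".toList i then acc.1 + 1 else acc.1
      (nk, if startsAt s.toList "start".toList i then acc.2 + nk else acc.2))
    (0, 0)).2

-- ===== PORT B =====
def kick_start_alt (s : String) : Int :=
  let l := s.toList
  let kick_pos := (List.range l.length).filter (fun i => startsAt l "kick".toList i)
  let start_pos := (List.range l.length).filter (fun i => startsAt l "start".toList i)
  (((start_pos.map (fun p => (kick_pos.filter (fun k => decide (k < p))).length)).sum : Nat) : Int)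

-- ===== PRECONDITION & SPEC =====
def Spec_kick_start (s : String) (out : Int) : Prop := out = kick_start_alt s
instance (s : String) (out : Int) : Decidable (Spec_kick_start s out) := by unfold Spec_kick_start; infer_instance

-- ===== CLAIM (what is proved, stated in full; the proofs are below) =====
def Claim_equal_kick_start : Prop := ∀ (s : String), Dom_kick_start s → Spec_kick_start s (kick_start s)

-- ===== LEMMAS AND PROOFS =====

-- "start" and "kick" cannot match at the same position
theorem disjoint_start_kick (l : List Char) (p : Nat)
    (h : startsAt l ['s', 't', 'a', 'r', 't'] p = true) :
    startsAt l ['k', 'i', 'c', 'k'] p = false := by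
  simp only [startsAt, PySem.Chars.startswith_iff] at h
  obtain ⟨t, ht⟩ := h
  refine Bool.eq_false_iff.mpr ?_
  intro hk
  simp only [startsAt, PySem.Chars.startswith_iff] at hk
  obtain ⟨u, hu⟩ := hk
  rw [← ht] at hu
  simp at hu

-- restricting the kick table to positions < p is the same as filtering range p
theorem filter_range_lt (f : Nat → Bool) (p n : Nat) (hpn : p ≤ n) :
    ((List.range n).filter f).filter (fun k => decide (k < p)) = (List.range p).filter f := by
  obtain ⟨m, rfl⟩ := Nat.exists_eq_add_of_le hpn
  rw [List.range_add, List.filter_append, List.filter_append]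
  have h1 : ((List.range p).filter f).filter (fun k => decide (k < p)) = (List.range p).filter f := by
    apply List.filter_eq_self.mpr
    intro a ha
    simp only [List.mem_filter, List.mem_range] at ha
    simp [ha.1]
  have h2 : (((List.range m).map (p + ·)).filter f).filter (fun k => decide (k < p)) = [] := by
    apply List.filter_eq_nil_iff.mpr
    intro a ha
    simp only [List.mem_filter, List.mem_map] at ha
    obtain ⟨⟨b, hb, rfl⟩, _⟩ := ha
    simp
  rw [h1, h2, List.append_nil]

-- characterisation of A's fold: first component counts kicks so far, second sums,
-- for each start position p seen, the number of kicks at positions ≤ p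
theorem foldA_char (l : List Char) (n : Nat) :
    (List.range n).foldl
      (fun (acc : Int × Int) i =>
        let nk := if startsAt l ['k', 'i', 'c', 'k'] i then acc.1 + 1 else acc.1
        (nk, if startsAt l ['s', 't', 'a', 'r', 't'] i then acc.2 + nk else acc.2))
      (0, 0)
    = ((((List.range n).countP (fun i => startsAt l ['k', 'i', 'c', 'k'] i) : Nat) : Int),
       ((((List.range n).filter (fun i => startsAt l ['s', 't', 'a', 'r', 't'] i)).map
          (fun p => (((List.range (p+1)).countP (fun i => startsAt l ['k', 'i', 'c', 'k'] i) : Nat) : Int))).sum)) := by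
  induction n with
  | zero => simp
  | succ n ih =>
    rw [List.range_succ, List.foldl_append, ih]
    by_cases hs : startsAt l ['s', 't', 'a', 'r', 't'] n = true
    · have hk : startsAt l ['k', 'i', 'c', 'k'] n = false := disjoint_start_kick l n hs
      simp [hk, hs, List.countP_append, List.range_succ]
    · by_cases hk : startsAt l ['k', 'i', 'c', 'k'] n = true
      · simp [hk, hs, List.countP_append]
      · simp only [Bool.not_eq_true] at hk
        simp [hk, hs, List.countP_append]

-- ===== VERDICT (by name: the statement is the Claim_ definition above) =====
theorem kick_start_spec : Claim_equal_kick_start := by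
  intro s _
  unfold Spec_kick_start kick_start kick_start_alt
  simp only [show "kick".toList = ['k', 'i', 'c', 'k'] from rfl,
             show "start".toList = ['s', 't', 'a', 'r', 't'] from rfl]
  rw [foldA_char]
  dsimp only
  rw [Nat.cast_list_sum, List.map_map]
  refine congrArg List.sum (List.map_congr_left ?_)
  intro p hp
  simp only [List.mem_filter, List.mem_range] at hp
  simp only [Function.comp]
  rw [filter_range_lt _ p _ (Nat.le_of_lt hp.1)]
  rw [show ((List.range p).filter (fun i => startsAt s.toList ['k', 'i', 'c', 'k'] i)).length = (List.range p).countP (fun i => startsAt s.toList ['k', 'i', 'c', 'k'] i) from List.countP_eq_length_filter.symm]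
  have h0 : startsAt s.toList ['k', 'i', 'c', 'k'] p = false := disjoint_start_kick s.toList p hp.2
  rw [List.range_succ, List.countP_append]
  simp [h0]
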